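-- pv_equiv track=rewrite | github.com/Derek-94/Python_solution_code | Programmers/Level2/2개 이하로 다른 비트.py | solution_revised
-- ===== SOURCE A (Python) =====
-- def solution_revised(numbers):
--     answer = []
--     for num in numbers:
--         if num % 2 == 0:
--             answer.append(num + 1)
--         else:
--             n1 = str(format(num, 'b'))
--             n1 = '0' + n1
--             n1 = list(n1)
--             for i in range(len(n1)-1, -1, -1):
--                 if n1[i] == '0':
--                     n1[i] = '1'
--                     n1[i+1] = '0'
--                     break
--             n2 = "".join(n1)
--             n2 = int(n2, 2)
--             answer.append(n2)
--     return answer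
-- ===== SOURCE B (Python) =====
-- def solution_revised(numbers):
--     # Per element: even -> num+1; odd -> add half of the lowest zero bit
--     # b = (~num) & (num+1) is the value of num's rightmost 0 bit; the
--     # 2-bit transformation sets that bit and clears the one below: +b - b//2 = +(b >> 1).
--     return [num + 1 if num % 2 == 0 else num + (((~num) & (num + 1)) >> 1)
--             for num in numbers]
-- ===== Notes on version B (the rewrite author's own statement) =====
-- stated objective: simpler
-- what changed: The odd branch's string formatting, char-list surgery and re-parsing (int(.,2)) are replaced by one bitwise closed form: num + (((~num) & (num+1)) >> 1); the whole function is a single comprehension with no inner loop.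
-- outside the precondition, e.g. on solution_revised([-3]): A returns [11], B returns [-2]; on solution_revised([-5]): A raises ValueError, B returns [-3]
import Mathlib
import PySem

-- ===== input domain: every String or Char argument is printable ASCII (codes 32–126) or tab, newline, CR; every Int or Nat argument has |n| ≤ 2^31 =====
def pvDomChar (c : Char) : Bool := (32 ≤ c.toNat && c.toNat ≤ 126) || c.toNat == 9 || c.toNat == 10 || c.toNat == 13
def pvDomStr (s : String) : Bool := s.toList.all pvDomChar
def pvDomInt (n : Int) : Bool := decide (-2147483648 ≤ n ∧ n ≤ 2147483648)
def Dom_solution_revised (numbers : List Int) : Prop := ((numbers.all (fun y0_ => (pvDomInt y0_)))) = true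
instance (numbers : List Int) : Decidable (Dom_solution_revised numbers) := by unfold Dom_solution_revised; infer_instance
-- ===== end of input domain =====

-- B replaces A's odd-branch string formatting, in-place char surgery and base-2 re-parsing
-- by the bitwise closed form num + (((~num) & (num+1)) >> 1); one comprehension, no inner loop.

-- ===== PORT A =====
-- format(n,'b') for a Nat, hand-ported (PySem has no binary formatting): MSB-first digit chars.
def bitsAux : Nat → List Char
  | 0 => []
  | (n+1) => bitsAux ((n+1)/2) ++ [if (n+1) % 2 == 1 then '1' else '0']
decreasing_by exact Nat.div_lt_self (Nat.succ_pos n) (by norm_num)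

def natBits (n : Nat) : List Char := if n = 0 then ['0'] else bitsAux n

-- format(num,'b'): '-' prefix for negative numbers, exact for every int.
def fmtB (num : Int) : List Char := if num < 0 then '-' :: natBits num.natAbs else natBits num.toNat

-- the inner `for i in range(len(n1)-1, -1, -1)` loop with its break, index-for-index.
def flipLoop : List Char → Nat → List Char
  | l, 0 => l
  | l, (i+1) => if l.getD i ' ' == '0' then (l.set i '1').set (i+1) '0' else flipLoop l i

-- int(s, 2), hand-ported (PySem has no base-2 parse); exact on the digit strings A builds.
def parseVal (l : List Char) : Int := l.foldl (fun a c => a * 2 + (if c == '1' then 1 else 0)) 0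
def parseBin (l : List Char) : Int := if l.head? == some '-' then -(parseVal l.tail) else parseVal l

-- the whole odd branch of A's loop body
def oddVal (num : Int) : Int :=
  let n1 := '0' :: fmtB num
  parseBin (flipLoop n1 n1.length)

def solution_revised (numbers : List Int) : List Int :=
  numbers.foldl
    (fun answer num =>
      if num % 2 == 0 then answer ++ [num + 1]
      else answer ++ [oddVal num]) []

-- ===== PORT B =====
-- Int.lnot / Int.land / Int.shiftRight are Python's ~, &, >> (two's-complement, floor shift).
def elemB (num : Int) : Int :=
  if num % 2 == 0 then num + 1
  else num + (Int.shiftRight (Int.land (Int.lnot num) (num + 1)) 1)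

def solution_revised_alt (numbers : List Int) : List Int := numbers.map elemB

-- ===== PRECONDITION & SPEC =====
-- Pre_ keeps odd elements to the problem's natural domain (non-negative: the source task's
-- numbers are positive integers); on a negative odd element A either raises ValueError
-- (int(n2, 2) sees the '-' left inside the digit string) or, when the magnitude is all
-- binary ones, returns a sign-corrupted positive number (-3 -> 11) from overwriting the
-- '-' character.  Negative even elements stay inside Pre_ and are matched.
def Pre_solution_revised (numbers : List Int) : Prop :=
  ∀ x ∈ numbers, x % 2 = 1 → 0 ≤ x
instance (numbers : List Int) : Decidable (Pre_solution_revised numbers) := by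
  unfold Pre_solution_revised; infer_instance

def pvWitness_solution_revised : List Int := [0, 7, 12, -4, 1023]

def Spec_solution_revised (numbers : List Int) (out : List Int) : Prop :=
  out = solution_revised_alt numbers
instance (numbers : List Int) (out : List Int) : Decidable (Spec_solution_revised numbers out) := by
  unfold Spec_solution_revised; infer_instance

-- ===== CLAIM (what is proved, stated in full; the proofs are below) =====
def Claim_equal_solution_revised : Prop := ∀ (numbers : List Int), Dom_solution_revised numbers → Pre_solution_revised numbers → Spec_solution_revised numbers (solution_revised numbers)

-- ===== LEMMAS AND PROOFS =====

theorem ldiff_odd (s : Nat) : Nat.ldiff (2 * s + 1) (2 * s) = 1 := by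
  apply Nat.eq_of_testBit_eq
  intro i
  rw [Nat.testBit_ldiff]
  cases i with
  | zero => simp [Nat.testBit_zero, Nat.mul_mod_right]
  | succ i =>
      rw [Nat.testBit_add_one, Nat.testBit_add_one, Nat.testBit_add_one]
      have h1 : (2 * s + 1) / 2 = s := by omega
      have h2 : (2 * s) / 2 = s := by omega
      have h3 : (1:Nat) / 2 = 0 := by norm_num
      rw [h1, h2, h3, Nat.zero_testBit, Bool.and_not_self]

theorem ldiff_double (a : Nat) (ha : 1 ≤ a) :
    Nat.ldiff (2 * a) (2 * a - 1) = 2 * Nat.ldiff a (a - 1) := by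
  apply Nat.eq_of_testBit_eq
  intro i
  rw [Nat.testBit_ldiff]
  cases i with
  | zero =>
      rw [Nat.testBit_zero, Nat.testBit_zero]
      simp [Nat.mul_mod_right]
  | succ i =>
      rw [Nat.testBit_add_one, Nat.testBit_add_one, Nat.testBit_add_one]
      have h1 : (2 * a) / 2 = a := by omega
      have h2 : (2 * a - 1) / 2 = a - 1 := by omega
      have h3 : (2 * Nat.ldiff a (a-1)) / 2 = Nat.ldiff a (a-1) := by omega
      rw [h1, h2, h3, Nat.testBit_ldiff]

theorem ldiff_low (j s : Nat) :
    Nat.ldiff (2 ^ (j+1) * s + 2 ^ j) (2 ^ (j+1) * s + 2 ^ j - 1) = 2 ^ j := by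
  induction j generalizing s with
  | zero =>
      simpa using ldiff_odd s
  | succ j ih =>
      have hM : 1 ≤ 2 ^ (j+1) * s + 2 ^ j := by have := Nat.one_le_two_pow (n := j); omega
      have he : 2 ^ (j+1+1) * s + 2 ^ (j+1) = 2 * (2 ^ (j+1) * s + 2 ^ j) := by ring
      rw [he, ldiff_double _ hM, ih s, pow_succ, Nat.mul_comm]

theorem two_le_pow (j : Nat) (hj : 1 ≤ j) : 2 ≤ 2 ^ j := by
  calc 2 = 2^1 := by norm_num
  _ ≤ 2^j := Nat.pow_le_pow_right (by norm_num) hj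

def pfx (s : Nat) : List Char := if s = 0 then [] else '0' :: bitsAux s

-- bitsAux unfolding for positive argument
theorem bitsAux_pos (n : Nat) (hn : 0 < n) :
    bitsAux n = bitsAux (n / 2) ++ [if n % 2 == 1 then '1' else '0'] := by
  obtain ⟨m, rfl⟩ : ∃ m, n = m + 1 := ⟨n - 1, by omega⟩
  rw [bitsAux]

theorem two_le_pow_succ (j : Nat) : 2 ≤ 2 ^ (j+1) := two_le_pow (j+1) (by omega)

theorem bits_decomp (j : Nat) (hj : 1 ≤ j) (s : Nat) :
    '0' :: bitsAux (2 ^ (j+1) * s + 2 ^ j - 1) = pfx s ++ '0' :: List.replicate j '1' := by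
  induction j with
  | zero => omega
  | succ j ih =>
      by_cases hj0 : j = 0
      · subst hj0
        have hk : 2 ^ (0+1+1) * s + 2 ^ (0+1) - 1 = 4 * s + 1 := by norm_num
        rw [hk]
        rw [bitsAux_pos (4*s+1) (by omega)]
        have h1 : (4*s+1) / 2 = 2 * s := by omega
        have h2 : ((4*s+1) % 2 == 1) = true := by simp only [beq_iff_eq]; omega
        rw [h1, h2]
        by_cases hs : s = 0
        · subst hs
          simp [pfx, bitsAux]
        · rw [bitsAux_pos (2*s) (by omega)]
          have h3 : (2*s) / 2 = s := by omega
          have h4 : ((2*s) % 2 == 1) = false := by simp only [beq_eq_false_iff_ne, ne_eq]; omega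
          rw [h3, h4]
          simp [pfx, hs, List.replicate]
      · have hj1 : 1 ≤ j := by omega
        have hih := ih hj1
        have hp1 : (1:Nat) ≤ 2 ^ j := Nat.one_le_two_pow
        have hp2 : (2:Nat) ≤ 2 ^ (j+1) := two_le_pow_succ j
        have hp3 : 2 ^ (j+1) = 2 * 2 ^ j := by ring
        have hp4 : 2 ^ (j+1+1) = 2 * 2 ^ (j+1) := by ring
        have hp5 : 2 ^ (j+1+1) * s = 2 * (2 ^ (j+1) * s) := by rw [hp4]; ring
        have hk : 2 ^ (j+1+1) * s + 2 ^ (j+1) - 1 = 2 * (2 ^ (j+1) * s + 2 ^ j - 1) + 1 := by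
          omega
        rw [hk, bitsAux_pos _ (by omega)]
        have h1 : (2 * (2 ^ (j+1) * s + 2 ^ j - 1) + 1) / 2 = 2 ^ (j+1) * s + 2 ^ j - 1 := by omega
        have h2 : ((2 * (2 ^ (j+1) * s + 2 ^ j - 1) + 1) % 2 == 1) = true := by
          simp only [beq_iff_eq]; omega
        rw [h1, h2]
        have hstep : '0' :: (bitsAux (2 ^ (j+1) * s + 2 ^ j - 1) ++ [if true = true then '1' else '0'])
             = ('0' :: bitsAux (2 ^ (j+1) * s + 2 ^ j - 1)) ++ ['1'] := by simp
        rw [hstep, hih]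
        simp [List.replicate_succ' (n := j)]

theorem flip_skip (l : List Char) (d : Nat) :
    ∀ i, (∀ t, t < d → l.getD (i + t) ' ' ≠ '0') → flipLoop l (i + d) = flipLoop l i := by
  induction d with
  | zero => intro i _; rfl
  | succ d ih =>
      intro i h
      have : i + (d + 1) = (i + d) + 1 := by omega
      rw [this, flipLoop]
      have hne : (l.getD (i + d) ' ' == '0') = false := by
        simp only [beq_eq_false_iff_ne]; exact h d (by omega)
      rw [hne]
      simp only [Bool.false_eq_true, if_false]
      exact ih i (fun t ht => h t (by omega))

theorem flip_hit (l : List Char) (P : Nat) (h : l.getD P ' ' = '0') :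
    flipLoop l (P + 1) = (l.set P '1').set (P + 1) '0' := by
  rw [flipLoop, h]
  simp

theorem set_append_len (p : List Char) (x y : Char) (r : List Char) :
    (p ++ x :: r).set p.length y = p ++ y :: r := by
  induction p with
  | nil => rfl
  | cons c p ih => simp [ih]

theorem getD_append_len (p : List Char) (x : Char) (r : List Char) :
    (p ++ x :: r).getD p.length ' ' = x := by
  induction p with
  | nil => rfl
  | cons c p ih => simp [ih]

-- the flip on a list decomposed as prefix ++ '0' :: j ones, j ≥ 1
theorem flip_full (p : List Char) (j : Nat) (hj : 1 ≤ j) :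
    flipLoop (p ++ '0' :: List.replicate j '1') (p ++ '0' :: List.replicate j '1').length
      = p ++ '1' :: '0' :: List.replicate (j-1) '1' := by
  set l := p ++ '0' :: List.replicate j '1' with hl
  have hlen : l.length = (p.length + 1) + j := by simp [hl]; omega
  have hskip : flipLoop l ((p.length + 1) + j) = flipLoop l (p.length + 1) := by
    apply flip_skip
    intro t ht
    have : l.getD (p.length + 1 + t) ' ' = (List.replicate j '1').getD t ' ' := by
      rw [hl]
      have : p ++ '0' :: List.replicate j '1' = (p ++ ['0']) ++ List.replicate j '1' := by simp
      rw [this]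
      have hlen2 : (p ++ ['0']).length = p.length + 1 := by simp
      rw [List.getD, List.getD]
      congr 1
      rw [List.getElem?_append_right (by simp)]
      simp
    rw [this]
    rw [List.getD, List.getElem?_replicate]
    have hlt : (t < j) = True := by simp [ht]
    simp [ht]
  have hget : l.getD p.length ' ' = '0' := by rw [hl]; exact getD_append_len p '0' _
  rw [hlen, hskip, flip_hit l p.length hget, hl]
  rw [set_append_len]
  obtain ⟨j', rfl⟩ : ∃ j', j = j' + 1 := ⟨j - 1, by omega⟩
  rw [List.replicate_succ]
  have : p ++ '1' :: '1' :: List.replicate j' '1' = (p ++ ['1']) ++ '1' :: List.replicate j' '1' := by simp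
  rw [this]
  have hplen : p.length + 1 = (p ++ ['1']).length := by simp
  rw [hplen, set_append_len]
  simp

theorem parse_acc (l : List Char) : ∀ a : Int,
    l.foldl (fun a c => a * 2 + (if c == '1' then 1 else 0)) a
      = a * 2 ^ l.length + parseVal l := by
  induction l with
  | nil => intro a; simp [parseVal]
  | cons c l ih =>
      intro a
      have h1 := ih (a * 2 + (if c == '1' then 1 else 0))
      have h2 := ih ((0:Int) * 2 + (if c == '1' then 1 else 0))
      simp only [List.foldl_cons, parseVal] at *
      rw [h1, h2]
      simp [List.length_cons, pow_succ]
      split_ifs <;> ring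

theorem parseVal_append (p q : List Char) :
    parseVal (p ++ q) = parseVal p * 2 ^ q.length + parseVal q := by
  unfold parseVal
  rw [List.foldl_append]
  exact parse_acc q _

theorem parseVal_bitsAux (n : Nat) : parseVal (bitsAux n) = (n : Int) := by
  induction n using Nat.strong_induction_on with
  | _ n ih =>
      match n with
      | 0 => simp [bitsAux, parseVal]
      | (m+1) =>
          rw [bitsAux, parseVal_append, ih ((m+1)/2) (Nat.div_lt_self (by omega) (by norm_num))]
          have : parseVal [if (m+1) % 2 == 1 then '1' else '0'] = (((m+1) % 2 : Nat) : Int) := by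
            by_cases h : (m+1) % 2 = 1
            · simp [h, parseVal]
            · have h0 : (m+1) % 2 = 0 := by omega
              simp [h0, parseVal]
          rw [this]
          simp only [List.length_singleton, pow_one]
          have hdm : ((m+1) : Int) = ((m+1)/2 : Nat) * 2 + (((m+1) % 2 : Nat) : Int) := by
            push_cast
            omega
          omega

theorem parseVal_replicate (t : Nat) : parseVal (List.replicate t '1') = 2 ^ t - 1 := by
  induction t with
  | zero => simp [parseVal]
  | succ t ih =>
      rw [List.replicate_succ', parseVal_append, ih]
      simp [parseVal, pow_succ]
      ring

theorem parseVal_pfx (s : Nat) : parseVal (pfx s) = (s : Int) := by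
  by_cases hs : s = 0
  · simp [pfx, hs, parseVal]
  · unfold pfx
    rw [if_neg hs]
    have : parseVal ('0' :: bitsAux s)
        = (bitsAux s).foldl (fun a c => a * 2 + (if c == '1' then 1 else 0)) ((0:Int) * 2 + 0) := by
      simp [parseVal]
    rw [this]
    simpa [parseVal] using parseVal_bitsAux s

theorem head_pfx_ne (s : Nat) (r : List Char) :
    ((pfx s ++ '1' :: r).head? == some '-') = false := by
  unfold pfx
  by_cases hs : s = 0 <;> simp [hs]

theorem oddVal_eq (j s : Nat) (hj : 1 ≤ j) :
    oddVal ((2 ^ (j+1) * s + 2 ^ j - 1 : Nat) : Int)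
      = ((2 ^ (j+1) * s + 2 ^ j - 1 : Nat) : Int) + 2 ^ (j-1) := by
  have hp1 : (2:Nat) ≤ 2 ^ j := two_le_pow j hj
  set k : Nat := 2 ^ (j+1) * s + 2 ^ j - 1 with hk
  have hk1 : 1 ≤ k := by omega
  have hnn : ¬ ((k : Int) < 0) := by omega
  have htn : (k : Int).toNat = k := by omega
  simp only [oddVal]
  unfold fmtB
  rw [if_neg hnn, htn]
  unfold natBits
  rw [if_neg (by omega)]
  rw [bits_decomp j hj s]
  rw [flip_full (pfx s) j hj]
  unfold parseBin
  rw [head_pfx_ne]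
  simp only [Bool.false_eq_true, if_false]
  rw [show (pfx s ++ '1' :: '0' :: List.replicate (j-1) '1')
        = pfx s ++ ('1' :: '0' :: List.replicate (j-1) '1') from rfl]
  rw [parseVal_append, parseVal_pfx]
  have hinner : parseVal ('1' :: '0' :: List.replicate (j-1) '1')
      = 2 ^ j + 2 ^ (j-1) - 1 := by
    have : parseVal ('1' :: '0' :: List.replicate (j-1) '1')
        = (List.replicate (j-1) '1').foldl (fun a c => a * 2 + (if c == '1' then 1 else 0)) 2 := by
      simp [parseVal]
    rw [this, parse_acc, parseVal_replicate]
    simp only [List.length_replicate]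
    have hj1 : j - 1 + 1 = j := by omega
    have : (2:Int) ^ j = 2 * 2 ^ (j-1) := by
      conv_lhs => rw [← hj1]
      ring
    rw [this]; ring
  rw [hinner]
  have hlen : ('1' :: '0' :: List.replicate (j-1) '1').length = j + 1 := by
    simp; omega
  rw [hlen]
  have hcast : ((k:Nat) : Int) = 2 ^ (j+1) * s + 2 ^ j - 1 := by
    have h1 : 1 ≤ 2 ^ (j+1) * s + 2 ^ j := by omega
    rw [hk, Nat.cast_sub h1]
    push_cast
    ring
  rw [hcast]
  ring

theorem elemB_odd (j s : Nat) (hj : 1 ≤ j) :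
    elemB ((2 ^ (j+1) * s + 2 ^ j - 1 : Nat) : Int)
      = ((2 ^ (j+1) * s + 2 ^ j - 1 : Nat) : Int) + 2 ^ (j-1) := by
  have hp0 : (2:Nat) ≤ 2 ^ j := two_le_pow j hj
  have hp1 : (2:Nat) ^ (j+1) = 2 * 2 ^ j := by ring
  have hp2 : (2:Nat) ^ j = 2 * 2 ^ (j-1) := by
    conv_lhs => rw [show j = (j-1)+1 by omega]
    ring
  have hp3 : 2 ^ (j+1) * s = 2 * (2 ^ j * s) := by rw [hp1]; ring
  set k : Nat := 2 ^ (j+1) * s + 2 ^ j - 1 with hk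
  have hkodd : k % 2 = 1 := by omega
  unfold elemB
  have hbeq : (((k : Int) % 2) == 0) = false := by
    simp only [beq_eq_false_iff_ne, ne_eq]
    omega
  rw [hbeq]
  simp only [Bool.false_eq_true, if_false]
  have h1 : Int.lnot (k : Int) = Int.negSucc k := rfl
  have h2 : ((k : Int) + 1) = Int.ofNat (k + 1) := rfl
  have h3 : Int.land (Int.negSucc k) (Int.ofNat (k+1)) = Int.ofNat (Nat.ldiff (k+1) k) := rfl
  have h4 : k + 1 = 2 ^ (j+1) * s + 2 ^ j := by omega
  have h5 : Nat.ldiff (k+1) k = 2 ^ j := by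
    rw [h4]; rw [show k = 2 ^ (j+1) * s + 2 ^ j - 1 from hk]; exact ldiff_low j s
  have h6 : Int.shiftRight (Int.ofNat (2 ^ j)) 1 = Int.ofNat (2 ^ j / 2) := by
    rw [show Int.shiftRight (Int.ofNat (2 ^ j)) 1 = Int.ofNat (2 ^ j >>> 1) from rfl]
    rw [Nat.shiftRight_succ, Nat.shiftRight_zero]
  have h7 : 2 ^ j / 2 = 2 ^ (j-1) := by omega
  rw [h1, h2, h3, h5, h6, h7]
  rw [show Int.ofNat (2 ^ (j-1)) = ((2 ^ (j-1) : Nat) : Int) from rfl]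
  push_cast
  ring

theorem decomp_exists (k : Nat) (hk : k % 2 = 1) :
    ∃ j s, 1 ≤ j ∧ k = 2 ^ (j+1) * s + 2 ^ j - 1 := by
  induction k using Nat.strong_induction_on with
  | _ k ih =>
      by_cases h4 : k % 4 = 1
      · exact ⟨1, k / 4, by omega, by norm_num; omega⟩
      · have h43 : k % 4 = 3 := by omega
        have hk' : (k / 2) % 2 = 1 := by omega
        obtain ⟨j, s, hj, hks⟩ := ih (k / 2) (by omega) hk'
        refine ⟨j + 1, s, by omega, ?_⟩
        have e1 : 2 ^ (j+1+1) * s = 2 * (2 ^ (j+1) * s) := by ring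
        have e2 : (2:Nat) ^ (j+1) = 2 * 2 ^ j := by ring
        have e3 : (1:Nat) ≤ 2 ^ j := Nat.one_le_two_pow
        omega

-- A's loop body as a per-element function
def elemA (num : Int) : Int := if num % 2 == 0 then num + 1 else oddVal num

theorem fold_map (xs : List Int) : ∀ acc : List Int,
    xs.foldl
      (fun answer num =>
        if num % 2 == 0 then answer ++ [num + 1]
        else answer ++ [oddVal num]) acc = acc ++ xs.map elemA := by
  induction xs with
  | nil => intro acc; simp
  | cons x xs ih =>
      intro acc
      simp only [List.foldl_cons, List.map_cons]
      by_cases hx : (x % 2 == 0) = true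
      · rw [if_pos hx, ih, elemA, if_pos hx]
        simp
      · rw [if_neg hx, ih, elemA, if_neg hx]
        simp

theorem solution_eq_map (xs : List Int) : solution_revised xs = xs.map elemA := by
  unfold solution_revised
  simpa using fold_map xs []

theorem elem_eq (x : Int) (hx : x % 2 = 1 → 0 ≤ x) : elemA x = elemB x := by
  have hcases : x % 2 = 0 ∨ x % 2 = 1 := by omega
  rcases hcases with h0 | h1
  · unfold elemA elemB
    rw [if_pos (by simpa using h0), if_pos (by simpa using h0)]
  · have hnn : 0 ≤ x := hx h1
    have hxk : x = ((x.toNat : Nat) : Int) := by omega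
    have hk1 : (x.toNat) % 2 = 1 := by omega
    obtain ⟨j, s, hj, hks⟩ := decomp_exists x.toNat hk1
    have hA : elemA x = oddVal x := by
      unfold elemA
      rw [if_neg (by simp only [beq_iff_eq]; omega)]
    rw [hA, hxk, hks, oddVal_eq j s hj, elemB_odd j s hj]

-- ===== VERDICT (by name: the statement is the Claim_ definition above) =====
theorem solution_revised_spec : Claim_equal_solution_revised := by
  intro numbers _ hpre
  show solution_revised numbers = solution_revised_alt numbers
  rw [solution_eq_map]
  unfold solution_revised_alt
  apply List.map_congr_left
  intro x hx
  exact elem_eq x (hpre x hx)
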